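-- pv_equiv track=rewrite | github.com/aswin7956/daily-code | code29.py | nambiar_number
-- ===== SOURCE A (Python) =====
-- def nambiar_number(n):
--     n = str(n) # conversion to string
--     res = [] # list to store the intermediate strings or can use string too andjust concat result
--     i = 0
--     l = len(n)
--     while i < l: # loop till end
--         cur = int(n[i])
--         j = i + 1
--         if cur % 2 == 1: # if odd
--             while j < l and cur % 2 != 0: #loop and add until sum is even
--                 cur += int(n[j])
--                 j += 1
--         else:
--             while j < l and cur % 2 == 0: #if even loop and sum until sum is odd
--                 cur += int(n[j])
--                 j += 1
--         res.append(str(cur))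
--         i = j  # reset i to the new position from j as previous numbers were added
--     return "".join(res) # join the list to display final res
-- ===== SOURCE B (Python) =====
-- def _groups(s):
--     # The running sum's parity flips exactly when an odd digit is added, so a
--     # group is: one digit, then a run of even digits, then the first odd digit
--     # after the start (if any).  No sum is ever tracked while splitting.
--     if not s:
--         return []
--     k = 1
--     while k < len(s) and int(s[k]) % 2 == 0:
--         k += 1
--     if k < len(s):
--         k += 1
--     return [s[:k]] + _groups(s[k:])
--
-- def nambiar_number(n):
--     return "".join(str(sum(int(c) for c in g)) for g in _groups(str(n)))
-- ===== Notes on version B (the rewrite author's own statement) =====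
-- stated objective: alternative
-- what changed: A tracks a running group sum and loops while its parity matches the group's start parity; B never tracks a sum while grouping: using the fact that the sum's parity flips exactly when an odd digit is added, it first splits the digit string recursively into groups (one digit, a run of even digits, then the first following odd digit) and then sums each group in a separate stage.
import Mathlib
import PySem

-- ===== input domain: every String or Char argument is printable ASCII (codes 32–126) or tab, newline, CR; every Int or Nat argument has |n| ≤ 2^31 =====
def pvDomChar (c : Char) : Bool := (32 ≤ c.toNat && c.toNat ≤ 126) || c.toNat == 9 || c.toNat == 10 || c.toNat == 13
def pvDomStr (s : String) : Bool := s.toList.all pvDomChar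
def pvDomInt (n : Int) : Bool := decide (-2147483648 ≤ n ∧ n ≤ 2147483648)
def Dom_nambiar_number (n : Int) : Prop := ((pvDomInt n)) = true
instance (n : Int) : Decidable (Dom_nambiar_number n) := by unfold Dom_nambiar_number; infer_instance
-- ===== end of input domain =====

-- B never tracks a running sum while grouping: it splits the digit string first (a group is
-- one digit, a run of even digits, then the first following odd digit, because the sum's
-- parity flips exactly when an odd digit is added) and sums each group in a second stage.
-- Return-value equivalence on nonnegative inputs (negative inputs raise in both).

-- int(c) for a single character: exact for digit chars '0'..'9'; on any other character
-- Python raises ValueError, which Pre_nambiar_number excludes (it happens exactly for n < 0,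
-- where str(n) starts with '-').
def pvDigit (c : Char) : Int := (c.toNat : Int) - 48

-- ===== PORT A =====
-- inner loop of the odd branch: while j < l and cur % 2 != 0
def pvGoOdd : Int → List Char → Int × List Char
  | cur, [] => (cur, [])
  | cur, c :: rest => if cur % 2 ≠ 0 then pvGoOdd (cur + pvDigit c) rest else (cur, c :: rest)

-- inner loop of the even branch: while j < l and cur % 2 == 0
def pvGoEven : Int → List Char → Int × List Char
  | cur, [] => (cur, [])
  | cur, c :: rest => if cur % 2 = 0 then pvGoEven (cur + pvDigit c) rest else (cur, c :: rest)

theorem pvGoOdd_len : ∀ (l : List Char) (cur : Int), (pvGoOdd cur l).2.length ≤ l.length := by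
  intro l
  induction l with
  | nil => intro cur; simp [pvGoOdd]
  | cons c rest ih =>
      intro cur
      simp only [pvGoOdd]
      split
      · exact le_trans (ih _) (Nat.le_succ _)
      · simp

theorem pvGoEven_len : ∀ (l : List Char) (cur : Int), (pvGoEven cur l).2.length ≤ l.length := by
  intro l
  induction l with
  | nil => intro cur; simp [pvGoEven]
  | cons c rest ih =>
      intro cur
      simp only [pvGoEven]
      split
      · exact le_trans (ih _) (Nat.le_succ _)
      · simp

-- the outer while loop: i consumed as the head of the remaining suffix, j as the suffix
-- returned by the inner loop
def pvOuter : List Char → List String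
  | [] => []
  | c :: rest =>
    let cur := pvDigit c
    if cur % 2 = 1 then
      let r := pvGoOdd cur rest
      PySem.Int.toStr r.1 :: pvOuter r.2
    else
      let r := pvGoEven cur rest
      PySem.Int.toStr r.1 :: pvOuter r.2
termination_by l => l.length
decreasing_by
  · exact Nat.lt_succ_of_le (pvGoOdd_len _ _)
  · exact Nat.lt_succ_of_le (pvGoEven_len _ _)

def nambiar_number (n : Int) : String :=
  PySem.Str.join "" (pvOuter (PySem.Int.toChars n))

-- ===== PORT B =====
-- the while loop of _groups: k = 1 + (run of even digits after the head)
def pvEvensRun : List Char → Nat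
  | [] => 0
  | c :: rest => if pvDigit c % 2 = 0 then pvEvensRun rest + 1 else 0

-- the final 'if k < len(s): k += 1' of _groups, phrased on the tail (m = k - 1)
def pvM (rest : List Char) : Nat :=
  if pvEvensRun rest < rest.length then pvEvensRun rest + 1 else pvEvensRun rest

-- _groups: split before ever summing anything
def pvGroups : List Char → List (List Char)
  | [] => []
  | c :: rest => (c :: rest.take (pvM rest)) :: pvGroups (rest.drop (pvM rest))
termination_by l => l.length
decreasing_by
  simp only [List.length_drop, List.length_cons]; omega

-- sum(int(c) for c in g)
def pvSumD (g : List Char) : Int := (g.map pvDigit).sum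

def nambiar_number_alt (n : Int) : String :=
  PySem.Str.join ""
    ((pvGroups (PySem.Int.toChars n)).map (fun g => PySem.Int.toStr (pvSumD g)))

-- ===== PRECONDITION & SPEC =====
-- Pre_ excludes negative inputs, on which Python's int of the '-' character raises ValueError in both A and B.
def Pre_nambiar_number (n : Int) : Prop := 0 ≤ n
instance (n : Int) : Decidable (Pre_nambiar_number n) := by unfold Pre_nambiar_number; infer_instance
def pvWitness_nambiar_number : Int := (1234567)

def Spec_nambiar_number (n : Int) (out : String) : Prop := out = nambiar_number_alt n
instance (n : Int) (out : String) : Decidable (Spec_nambiar_number n out) := by unfold Spec_nambiar_number; infer_instance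

-- ===== CLAIM (what is proved, stated in full; the proofs are below) =====
def Claim_equal_nambiar_number : Prop := ∀ (n : Int), Dom_nambiar_number n → Pre_nambiar_number n → Spec_nambiar_number n (nambiar_number n)

-- ===== LEMMAS AND PROOFS =====

-- both of A's inner loops absorb while cur % 2 equals the group's start parity p
def pvAbsorb (p : Int) : Int → List Char → Int × List Char
  | cur, [] => (cur, [])
  | cur, c :: rest => if cur % 2 = p then pvAbsorb p (cur + pvDigit c) rest else (cur, c :: rest)

theorem pvGoOdd_eq_absorb : ∀ (l : List Char) (cur : Int), pvGoOdd cur l = pvAbsorb 1 cur l := by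
  intro l
  induction l with
  | nil => intro cur; simp [pvGoOdd, pvAbsorb]
  | cons c rest ih =>
      intro cur
      simp only [pvGoOdd, pvAbsorb]
      have h2 : cur % 2 = 0 ∨ cur % 2 = 1 := by omega
      rcases h2 with h | h <;> simp [h, ih]

theorem pvGoEven_eq_absorb : ∀ (l : List Char) (cur : Int), pvGoEven cur l = pvAbsorb 0 cur l := by
  intro l
  induction l with
  | nil => intro cur; simp [pvGoEven, pvAbsorb]
  | cons c rest ih =>
      intro cur
      simp only [pvGoEven, pvAbsorb, ih]

theorem pvOuter_cons (c : Char) (rest : List Char) :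
    pvOuter (c :: rest) =
      PySem.Int.toStr (pvAbsorb (pvDigit c % 2) (pvDigit c) rest).1 ::
        pvOuter (pvAbsorb (pvDigit c % 2) (pvDigit c) rest).2 := by
  rw [pvOuter]
  have h2 : pvDigit c % 2 = 0 ∨ pvDigit c % 2 = 1 := by omega
  rcases h2 with h | h <;>
    simp [h, pvGoOdd_eq_absorb, pvGoEven_eq_absorb]

theorem pvEvensRun_le : ∀ (l : List Char), pvEvensRun l ≤ l.length := by
  intro l
  induction l with
  | nil => simp [pvEvensRun]
  | cons c rest ih =>
      simp only [pvEvensRun, List.length_cons]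
      split <;> omega

-- A's absorb loop, started at the group's own parity, stops exactly where B cuts:
-- after the leading run of even digits plus the first odd digit (if any)
theorem pvAbsorb_eq_cut : ∀ (l : List Char) (cur : Int),
    pvAbsorb (cur % 2) cur l = (cur + pvSumD (l.take (pvM l)), l.drop (pvM l)) := by
  intro l
  induction l with
  | nil => intro cur; simp [pvAbsorb, pvM, pvEvensRun, pvSumD]
  | cons c rest ih =>
      intro cur
      have hstep : pvAbsorb (cur % 2) cur (c :: rest)
          = pvAbsorb (cur % 2) (cur + pvDigit c) rest := by
        simp [pvAbsorb]
      by_cases hd : pvDigit c % 2 = 0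
      · -- even digit: parity unchanged, absorb continues; B's cut shifts by one
        have hpar : (cur + pvDigit c) % 2 = cur % 2 := by omega
        have hm : pvM (c :: rest) = pvM rest + 1 := by
          have := pvEvensRun_le rest
          unfold pvM
          simp only [pvEvensRun, hd, if_pos, List.length_cons]
          split_ifs <;> omega
        rw [hstep, ← hpar, ih (cur + pvDigit c), hm]
        simp [pvSumD, add_assoc]
      · -- odd digit: parity flips, absorb stops right after it; B cuts after it too
        have hd1 : pvDigit c % 2 = 1 := by omega
        have hpar : (cur + pvDigit c) % 2 ≠ cur % 2 := by omega
        have hm : pvM (c :: rest) = 1 := by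
          unfold pvM
          simp only [pvEvensRun, hd1, List.length_cons]
          simp
        rw [hstep, hm]
        cases rest with
        | nil => simp [pvAbsorb, pvSumD]
        | cons c' rest' => simp [pvAbsorb, if_neg hpar, pvSumD]

theorem pvOuter_eq_groups : ∀ (s : List Char),
    pvOuter s = (pvGroups s).map (fun g => PySem.Int.toStr (pvSumD g)) := by
  intro s
  induction s using pvGroups.induct with
  | case1 => simp [pvOuter, pvGroups]
  | case2 c rest ih =>
      rw [pvOuter_cons, pvAbsorb_eq_cut rest (pvDigit c), pvGroups, ih]
      simp [pvSumD]

-- ===== VERDICT (by name: the statement is the Claim_ definition above) =====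
theorem nambiar_number_spec : Claim_equal_nambiar_number := by
  intro n _ _
  show nambiar_number n = nambiar_number_alt n
  unfold nambiar_number nambiar_number_alt
  rw [pvOuter_eq_groups]
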